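-- pv_equiv track=rewrite | github.com/BashCtl/python-edabit | very_hard/recursion_out_shuffle.py | shuffle_count
-- ===== SOURCE A (Python) =====
-- def shuffle_count(num, temp=[]):
--     if len(temp) == 0:
--         temp = [i for i in range(2, num)]
--     mid = len(temp) // 2
--     shuffled = []
--     for x, y in zip(temp[:mid], temp[mid:]):
--         shuffled.append(y)
--         shuffled.append(x)
--     if shuffled == sorted(shuffled):
--         temp.clear()
--         return 1
--     return 1 + shuffle_count(num, shuffled)
-- ===== SOURCE B (Python) =====
-- def shuffle_count(num, temp=[]):
--     # Count of out-shuffles needed to re-sort the deck. The shuffle is a fixed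
--     # position permutation i -> (2**k*(i+1)-1) % (m+1) on the even part of the
--     # deck (an odd deck loses its last card in the first shuffle), so instead of
--     # repeatedly rebuilding and re-sorting lists:
--     # - for the standard deck list(range(2, num)) the answer is the
--     #   multiplicative order of 2 modulo n+1 (n = num-2 even) resp. modulo n
--     #   (n odd), computed by a doubling loop;
--     # - for an explicit deck temp, scan the powers of the permutation (at most
--     #   m+1 of them are distinct) for the first one that leaves temp sorted.
--     if len(temp) == 0:
--         n = num - 2
--         if n <= 1:
--             return 1
--         m = n + 1 if n % 2 == 0 else n
--         p = 2 % m
--         k = 1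
--         while p != 1:
--             p = 2 * p % m
--             k += 1
--         return k
--     u = temp[:2 * (len(temp) // 2)]
--     m = len(u)
--     M = m + 1
--     c = m // 2 + 1
--     q = 1
--     for k in range(1, M + 1):
--         q = q * c % M
--         arr = [u[(q * (i + 1) - 1) % M] for i in range(m)]
--         if all(arr[i] <= arr[i + 1] for i in range(m - 1)):
--             return k
--     raise ValueError("the shuffle orbit of temp never reaches sorted order")
-- ===== Notes on version B (the rewrite author's own statement) =====
-- stated objective: faster
-- what changed: A repeatedly rebuilds the shuffled list and compares it with its sorted copy (O(n) work per shuffle, recursively); B uses the closed form of the shuffle as the fixed position permutation i -> (2^k(i+1)-1) mod (m+1): for the standard deck range(2, num) it returns the multiplicative order of 2 modulo n+1 (n even) resp. n (n odd) by a O(1)-per-step doubling loop, and for an explicit deck it scans the at most m+1 distinct powers of that permutation for the first that leaves the deck sorted.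
import Mathlib
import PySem

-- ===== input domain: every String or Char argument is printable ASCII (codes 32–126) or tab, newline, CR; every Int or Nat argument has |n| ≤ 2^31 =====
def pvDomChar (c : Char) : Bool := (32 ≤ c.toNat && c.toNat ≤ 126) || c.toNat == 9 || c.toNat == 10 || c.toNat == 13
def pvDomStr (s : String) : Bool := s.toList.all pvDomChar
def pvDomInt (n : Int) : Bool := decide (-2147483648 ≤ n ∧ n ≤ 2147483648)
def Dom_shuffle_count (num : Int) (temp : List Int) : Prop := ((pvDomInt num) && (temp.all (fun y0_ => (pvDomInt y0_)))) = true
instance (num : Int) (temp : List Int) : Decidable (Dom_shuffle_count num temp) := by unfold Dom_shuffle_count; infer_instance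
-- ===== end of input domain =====

-- B replaces A's repeated shuffle-and-resort recursion by the closed form of the shuffle
-- permutation: the order of 2 mod n+1 (n = num-2 even) resp. n (n odd) for the standard
-- deck, a scan of the permutation's powers for an explicit deck. Return-value equivalence
-- only: A may clear a caller-supplied non-empty temp in place, B never mutates temp.


-- ===== PORT A =====
-- one shuffle pass: mid = len(temp)//2; for x, y in zip(temp[:mid], temp[mid:]): append y; append x
def pvStepA (temp : List Int) : List Int :=
  let mid : Int := PySem.Int.floordiv (temp.length : Int) 2
  ((PySem.List.slice temp none (some mid)).zip (PySem.List.slice temp (some mid) none)).foldl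
    (fun shuffled xy => (shuffled ++ [xy.2]) ++ [xy.1]) []

-- A's recursion, fuel-totalised (fuel suffices on Pre_; 0 on exhaustion is never reached there)
def pvGoA : Nat → Int → List Int → Int
  | 0, _, _ => 0
  | (fuel+1), num, temp =>
    let shuffled := pvStepA temp
    if shuffled = PySem.List.sorted shuffled (fun x => x) false then 1
    else 1 + pvGoA fuel num shuffled

def shuffle_count (num : Int) (temp : List Int) : Int :=
  let temp2 := if temp.length = 0 then PySem.List.pyRange 2 num 1 else temp
  pvGoA (num.toNat + temp.length + 2) num temp2

-- ===== PORT B =====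
-- while p != 1: p = 2 * p % m; k += 1   (fuel m+1 suffices: the order of 2 mod m is < m)
def pvOrdLoopB : Nat → Int → Int → Int → Int
  | 0, _, _, k => k
  | (fuel+1), m, p, k =>
    if p = 1 then k else pvOrdLoopB fuel m (PySem.Int.mod (2 * p) m) (k + 1)

-- arr = [u[(q * (i + 1) - 1) % M] for i in range(m)]
def pvArrB (u : List Int) (q M : Int) (m : Nat) : List Int :=
  (List.range m).map (fun (i : Nat) => PySem.List.pyGetD u (PySem.Int.mod (q * ((i : Int) + 1) - 1) M) 0)

-- for k in range(1, M + 1): q = q * c % M; if arr is non-decreasing (all adjacent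
-- pairs ordered, = Pairwise for ≤): return k.  fuel = M; exhaustion = Python's
-- ValueError, outside Pre_
def pvSearchB (u : List Int) (M c : Int) (m : Nat) : Nat → Int → Int → Int
  | 0, _, _ => 0
  | (fuel+1), q, k =>
    let q2 := PySem.Int.mod (q * c) M
    let arr := pvArrB u q2 M m
    if arr.Pairwise (· ≤ ·) then k
    else pvSearchB u M c m fuel q2 (k + 1)

def shuffle_count_alt (num : Int) (temp : List Int) : Int :=
  if temp.length = 0 then
    let n := num - 2
    if n ≤ 1 then 1
    else
      let m := if PySem.Int.mod n 2 = 0 then n + 1 else n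
      pvOrdLoopB (m.toNat + 1) m (PySem.Int.mod 2 m) 1
  else
    let u := PySem.List.slice temp none (some (2 * PySem.Int.floordiv (temp.length : Int) 2))
    let m := u.length
    let M := (m : Int) + 1
    let c := PySem.Int.floordiv (m : Int) 2 + 1
    pvSearchB u M c m M.toNat 1 1

-- ===== shared index arithmetic (used by Pre_ below and by the proofs) =====
-- position map of one shuffle on an even deck of size 2*mid (M = 2*mid+1):
-- after k shuffles position i holds the card that started at pidx M ((mid+1)^k) i
def pidx (M p i : Nat) : Nat := (p * (i + 1) + (M - 1)) % M

-- the even part of the deck u after j shuffles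
def pvArrN (u : List Int) (mid j : Nat) : List Int :=
  (List.range (2 * mid)).map
    (fun i => u.getD (pidx (2 * mid + 1) ((mid + 1) ^ j % (2 * mid + 1)) i) 0)

-- ===== PRECONDITION & SPEC =====
-- Pre_ admits exactly the calls on which A terminates: the intended call temp = [] (always
-- terminates), and an explicit non-empty deck temp whose shuffle orbit reaches a sorted
-- arrangement (some power k ≤ m+1 of the fixed shuffle permutation sorts it).  Excluded are
-- only the non-empty temps on which A recurses forever until RecursionError (B raises
-- ValueError there).
def Pre_shuffle_count (num : Int) (temp : List Int) : Prop :=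
  temp = [] ∨ ∃ k ∈ Finset.Icc 1 (2 * (temp.length / 2) + 1),
    (pvArrN (temp.take (2 * (temp.length / 2))) (temp.length / 2) k).Pairwise (· ≤ ·)
instance (num : Int) (temp : List Int) : Decidable (Pre_shuffle_count num temp) := by
  unfold Pre_shuffle_count; infer_instance

def pvWitness_shuffle_count : Int × List Int := (6, [])

def Spec_shuffle_count (num : Int) (temp : List Int) (out : Int) : Prop := out = shuffle_count_alt num temp
instance (num : Int) (temp : List Int) (out : Int) : Decidable (Spec_shuffle_count num temp out) := by unfold Spec_shuffle_count; infer_instance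

-- ===== CLAIM (what is proved, stated in full; the proofs are below) =====
def Claim_equal_shuffle_count : Prop := ∀ (num : Int) (temp : List Int), Dom_shuffle_count num temp → Pre_shuffle_count num temp → Spec_shuffle_count num temp (shuffle_count num temp)

-- ===== LEMMAS AND PROOFS =====

-- interleave of the two half-decks, as A's zip loop builds it
def pvInter : List Int → List Int → List Int
  | x :: xs, y :: ys => y :: x :: pvInter xs ys
  | _, _ => []

-- the deck after k shuffles of the sorted even deck [2 .. M], p = c^k % M
def pvL (M p : Nat) : List Int := (List.range (M - 1)).map (fun i => ((pidx M p i : Nat) : Int) + 2)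

lemma pvInter_nil (ys : List Int) : pvInter [] ys = [] := by cases ys <;> rfl

lemma foldl_zip_inter : ∀ (xs ys acc : List Int),
    (xs.zip ys).foldl (fun s xy => (s ++ [xy.2]) ++ [xy.1]) acc = acc ++ pvInter xs ys := by
  intro xs
  induction xs with
  | nil => intro ys acc; simp [pvInter_nil]
  | cons x xs ih =>
    intro ys acc
    cases ys with
    | nil => simp [pvInter]
    | cons y ys =>
      simp only [List.zip_cons_cons, List.foldl_cons]
      rw [ih ys ((acc ++ [y]) ++ [x])]
      simp [pvInter, List.append_assoc]

lemma pvStepA_eq (t : List Int) :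
    pvStepA t = pvInter (t.take (t.length / 2)) (t.drop (t.length / 2)) := by
  have hf : PySem.Int.floordiv ((t.length : Nat) : Int) 2 = ((t.length / 2 : Nat) : Int) := by
    exact_mod_cast PySem.Int.floordiv_natCast t.length 2
  simp only [pvStepA, hf, PySem.List.slice_to_natCast, PySem.List.slice_from_natCast,
    foldl_zip_inter]
  simp

lemma pvInter_length : ∀ (xs ys : List Int), xs.length = ys.length →
    (pvInter xs ys).length = 2 * xs.length := by
  intro xs
  induction xs with
  | nil => intro ys h; simp [pvInter_nil]
  | cons x xs ih =>
    intro ys h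
    cases ys with
    | nil => simp at h
    | cons y ys =>
      simp [pvInter, ih ys (by simpa using h)]; omega

lemma pvInter_getD : ∀ (xs ys : List Int) (i : Nat), xs.length = ys.length → i < 2 * xs.length →
    (pvInter xs ys).getD i 0 = if i % 2 = 0 then ys.getD (i / 2) 0 else xs.getD (i / 2) 0 := by
  intro xs
  induction xs with
  | nil => intro ys i h hi; simp at hi
  | cons x xs ih =>
    intro ys i h hi
    cases ys with
    | nil => simp at h
    | cons y ys =>
      match i with
      | 0 => simp [pvInter]
      | 1 => simp [pvInter]
      | (i+2) =>
        have h' : xs.length = ys.length := by simpa using h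
        have hi' : i < 2 * xs.length := by
          simp only [List.length_cons] at hi; omega
        have hrec := ih ys i h' hi'
        show (pvInter (x :: xs) (y :: ys)).getD (i + 2) 0 = _
        simp only [pvInter, List.getD_cons_succ]
        rw [hrec]
        have h2 : (i + 2) % 2 = i % 2 := by omega
        have h3 : (i + 2) / 2 = i / 2 + 1 := by omega
        rw [h2, h3]
        by_cases hp : i % 2 = 0 <;> simp [hp]

lemma eq_map_range_of_getD (l : List Int) (n : Nat) (f : Nat → Int)
    (hl : l.length = n) (h : ∀ i < n, l.getD i 0 = f i) :
    l = (List.range n).map f := by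
  apply List.ext_getElem (by simpa using hl)
  intro i hi _
  have hin : i < n := by omega
  have := h i hin
  rw [List.getD_eq_getElem l 0 (by omega)] at this
  simpa using this

lemma getD_map_range_pv (f : Nat → Int) (n i : Nat) (hi : i < n) :
    ((List.range n).map f).getD i 0 = f i := by
  rw [List.getD_eq_getElem _ 0 (by simpa using hi)]
  simp

lemma pvGoA_succ (fuel : Nat) (num : Int) (temp : List Int) :
    pvGoA (fuel + 1) num temp =
      if pvStepA temp = PySem.List.sorted (pvStepA temp) (fun x => x) false then 1
      else 1 + pvGoA fuel num (pvStepA temp) := rfl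

lemma pidx_even (mid j : Nat) (hj : j < mid) :
    pidx (2 * mid + 1) (mid + 1) (2 * j) = mid + j := by
  unfold pidx
  have key : (mid + 1) * (2 * j + 1) + (2 * mid + 1 - 1) = (mid + j) + (j + 1) * (2 * mid + 1) := by
    simp only [Nat.add_sub_cancel]; ring
  rw [key, Nat.add_mul_mod_self_right, Nat.mod_eq_of_lt (by omega)]

lemma pidx_odd (mid j : Nat) (hj : j < mid) :
    pidx (2 * mid + 1) (mid + 1) (2 * j + 1) = j := by
  unfold pidx
  have key : (mid + 1) * (2 * j + 1 + 1) + (2 * mid + 1 - 1) = j + (j + 2) * (2 * mid + 1) := by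
    simp only [Nat.add_sub_cancel]; ring
  rw [key, Nat.add_mul_mod_self_right, Nat.mod_eq_of_lt (by omega)]

-- one shuffle of an even deck t, as a reindexing by pidx with multiplier c = mid+1
lemma step_even (mid : Nat) (t : List Int) (ht : t.length = 2 * mid) :
    pvStepA t = (List.range (2 * mid)).map (fun i => t.getD (pidx (2 * mid + 1) (mid + 1) i) 0) := by
  rw [pvStepA_eq, ht]
  have hhalf : 2 * mid / 2 = mid := by omega
  rw [hhalf]
  have hxs : (t.take mid).length = mid := by simp [ht]; omega
  have hys : (t.drop mid).length = mid := by simp [ht]; omega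
  apply eq_map_range_of_getD
  · rw [pvInter_length _ _ (hxs.trans hys.symm), hxs]
  · intro i hi
    rw [pvInter_getD _ _ i (hxs.trans hys.symm) (by omega)]
    have hd : i / 2 < mid := by omega
    have hdropD : ∀ j, j < mid → (t.drop mid).getD j 0 = t.getD (mid + j) 0 := by
      intro j hj
      rw [List.getD_eq_getElem _ 0 (by rw [hys]; omega),
          List.getD_eq_getElem _ 0 (by omega)]
      simp
    have htakeD : ∀ j, j < mid → (t.take mid).getD j 0 = t.getD j 0 := by
      intro j hj
      rw [List.getD_eq_getElem _ 0 (by rw [hxs]; omega),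
          List.getD_eq_getElem _ 0 (by omega)]
      simp
    by_cases hp : i % 2 = 0
    · have hij : i = 2 * (i / 2) := by omega
      have hpe : pidx (2 * mid + 1) (mid + 1) i = mid + i / 2 := by
        conv_lhs => rw [hij]
        exact pidx_even mid (i / 2) hd
      rw [if_pos hp, hpe, hdropD (i / 2) hd]
    · have hij : i = 2 * (i / 2) + 1 := by omega
      have hpo : pidx (2 * mid + 1) (mid + 1) i = i / 2 := by
        conv_lhs => rw [hij]
        exact pidx_odd mid (i / 2) hd
      rw [if_neg hp, hpo, htakeD (i / 2) hd]

lemma pidx_congr (M p p' i : Nat) (h : p % M = p' % M) : pidx M p i = pidx M p' i := by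
  unfold pidx
  exact Nat.ModEq.add_right _ (Nat.ModEq.mul_right _ h)

lemma pidx_one (M i : Nat) (hi : i < M - 1) : pidx M 1 i = i := by
  unfold pidx
  have key : 1 * (i + 1) + (M - 1) = i + M := by omega
  rw [key, Nat.add_mod_right, Nat.mod_eq_of_lt (by omega)]

lemma pidx_comp (M a p i : Nat) (hM : 1 ≤ M) :
    pidx M p (pidx M a i) = pidx M ((a * p) % M) i := by
  unfold pidx
  apply Nat.ModEq.add_right
  have h1 : (a * (i + 1) + (M - 1)) % M + 1 ≡ a * (i + 1) + (M - 1) + 1 [MOD M] :=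
    Nat.ModEq.add_right 1 (Nat.mod_modEq _ M)
  have h2 : a * (i + 1) + (M - 1) + 1 = a * (i + 1) + M := by omega
  have h3 : a * (i + 1) + M ≡ a * (i + 1) [MOD M] := by
    simpa using (Nat.ModEq.add_left (a * (i + 1)) (Nat.modEq_zero_iff_dvd.2 dvd_rfl))
  have h4 : (a * (i + 1) + (M - 1)) % M + 1 ≡ a * (i + 1) [MOD M] :=
    (h1.trans (by rw [h2])).trans h3
  calc p * ((a * (i + 1) + (M - 1)) % M + 1)
      ≡ p * (a * (i + 1)) [MOD M] := Nat.ModEq.mul_left p h4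
    _ = (a * p) * (i + 1) := by ring
    _ ≡ (a * p) % M * (i + 1) [MOD M] := Nat.ModEq.mul_right _ (Nat.mod_modEq _ M).symm

-- pidx with an invertible multiplier never produces the dropped last position M-1
lemma pidx_lt (M p q i : Nat) (hM : 3 ≤ M) (hpq : p * q % M = 1 % M) (hi : i < M - 1) :
    pidx M p i < M - 1 := by
  unfold pidx
  set r := p * (i + 1) % M with hr
  have hrM : r < M := Nat.mod_lt _ (by omega)
  have hsplit : (p * (i + 1) + (M - 1)) % M = (r + (M - 1)) % M :=
    (Nat.ModEq.add_right (M - 1) (Nat.mod_modEq (p * (i + 1)) M)).symm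
  by_cases hr0 : r = 0
  · exfalso
    have hdvd : M ∣ p * (i + 1) := Nat.dvd_of_mod_eq_zero (hr ▸ hr0)
    have h2 : M ∣ q * (p * (i + 1)) := Dvd.dvd.mul_left hdvd q
    have hme : Nat.ModEq M (i + 1) (q * (p * (i + 1))) := by
      calc (i + 1) = 1 * (i + 1) := by ring
        _ ≡ (p * q) * (i + 1) [MOD M] := Nat.ModEq.mul_right _ (show Nat.ModEq M 1 (p * q) from hpq.symm)
        _ = q * (p * (i + 1)) := by ring
    have h3 : (i + 1) % M = 0 := by
      rw [show (i + 1) % M = (q * (p * (i + 1))) % M from hme]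
      obtain ⟨c, hc⟩ := h2
      rw [hc, Nat.mul_mod_right]
    have hd4 : M ∣ i + 1 := Nat.dvd_of_mod_eq_zero h3
    have := Nat.le_of_dvd (by omega) hd4
    omega
  · have hval : (r + (M - 1)) % M = r - 1 := by
      have h5 : r + (M - 1) = (r - 1) + M := by omega
      rw [h5, Nat.add_mod_right, Nat.mod_eq_of_lt (by omega)]
    rw [hsplit, hval]
    omega

lemma pvL_length (M p : Nat) : (pvL M p).length = M - 1 := by simp [pvL]

lemma pvL_getD (M p i : Nat) (hi : i < M - 1) :
    (pvL M p).getD i 0 = ((pidx M p i : Nat) : Int) + 2 := by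
  rw [List.getD_eq_getElem _ 0 (by simp [pvL]; omega)]
  simp [pvL]

lemma pvL_congr (M p p' : Nat) (h : p % M = p' % M) : pvL M p = pvL M p' := by
  unfold pvL
  exact List.map_congr_left (fun i _ => by rw [pidx_congr M p p' i h])

lemma pvL_one (M : Nat) : pvL M 1 = (List.range (M - 1)).map (fun i => ((i : Nat) : Int) + 2) := by
  unfold pvL
  exact List.map_congr_left (fun i hi => by rw [pidx_one M i (List.mem_range.1 hi)])

-- one shuffle advances the deck parameter by one factor of c = mid+1
lemma step_pvL (mid p q : Nat) (hm : 1 ≤ mid) (hpq : p * q % (2 * mid + 1) = 1 % (2 * mid + 1)) :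
    pvStepA (pvL (2 * mid + 1) p) = pvL (2 * mid + 1) (((mid + 1) * p) % (2 * mid + 1)) := by
  set M := 2 * mid + 1 with hM
  have hM3 : 3 ≤ M := by omega
  have hlen : (pvL M p).length = 2 * mid := by rw [pvL_length]; omega
  rw [step_even mid _ hlen]
  unfold pvL
  rw [show M - 1 = 2 * mid from by omega]
  apply List.map_congr_left
  intro i hi
  have hi' : i < M - 1 := by have := List.mem_range.1 hi; omega
  have hb : pidx M (mid + 1) i < M - 1 := by
    apply pidx_lt M (mid + 1) 2 i hM3 _ hi'
    have h2c : (mid + 1) * 2 = M + 1 := by omega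
    rw [h2c, Nat.add_mod_left]
  rw [show M - 1 = 2 * mid from by omega] at hb
  rw [getD_map_range_pv _ _ _ hb, pidx_comp M (mid + 1) p i (by omega)]

lemma sorted_pvL (M p q : Nat) (hM : 3 ≤ M) (hpq : p * q % M = 1 % M) :
    PySem.List.sorted (pvL M p) (fun x => x) false = pvL M 1 := by
  apply PySem.List.sorted_eq_of_perm_of_pairwise_lt
  · -- (pvL M 1).Perm (pvL M p)
    have hmm : ∀ a b : Nat, a * b % M = 1 % M → ∀ i, i < M - 1 → pidx M a (pidx M b i) = i := by
      intro a b hab i hi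
      rw [pidx_comp M b a i (by omega)]
      rw [pidx_congr M (b * a % M) 1 i (by
        rw [Nat.mod_mod_of_dvd _ dvd_rfl, Nat.mul_comm]; exact hab)]
      exact pidx_one M i hi
    have hqp : q * p % M = 1 % M := by rwa [Nat.mul_comm] at hpq
    have hperm : (List.range (M - 1)).Perm ((List.range (M - 1)).map (pidx M p)) := by
      rw [List.perm_ext_iff_of_nodup (List.nodup_range) ?nd]
      case nd =>
        apply List.Nodup.map_on _ List.nodup_range
        intro x hx y hy hxy
        have hx' := List.mem_range.1 hx
        have hy' := List.mem_range.1 hy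
        have := congrArg (pidx M q) hxy
        rwa [hmm q p hqp x hx', hmm q p hqp y hy'] at this
      intro a
      constructor
      · intro ha
        have ha' := List.mem_range.1 ha
        refine List.mem_map.2 ⟨pidx M q a, List.mem_range.2 ?_, hmm p q hpq a ha'⟩
        exact pidx_lt M q p a hM hqp ha'
      · intro ha
        obtain ⟨b, hb, rfl⟩ := List.mem_map.1 ha
        exact List.mem_range.2 (pidx_lt M p q b hM hpq (List.mem_range.1 hb))
    have : pvL M p = ((List.range (M - 1)).map (pidx M p)).map (fun j => ((j : Nat) : Int) + 2) := by
      unfold pvL; rw [List.map_map]; rfl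
    rw [this, pvL_one]
    exact hperm.map _
  · -- strictly increasing
    rw [pvL_one]
    refine List.Pairwise.map _ ?_ (List.pairwise_lt_range)
    intro a b hab
    show ((a : Nat) : Int) + 2 < ((b : Nat) : Int) + 2
    omega

lemma pvL_eq_one_iff (M p : Nat) (hM : 3 ≤ M) : pvL M p = pvL M 1 ↔ p % M = 1 % M := by
  constructor
  · intro h
    have h0 := congrArg (fun l => l.getD 0 0) h
    simp only [] at h0
    rw [pvL_getD M p 0 (by omega), pvL_getD M 1 0 (by omega)] at h0
    have : pidx M p 0 = pidx M 1 0 := by omega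
    rw [pidx_one M 0 (by omega)] at this
    unfold pidx at this
    have hd : (p * 1 + (M - 1)) % M = 0 := this
    have h5 : p * 1 + (M - 1) = (p - 1) + M ∨ p = 0 := by omega
    rcases h5 with h5 | h5
    · rw [h5, Nat.add_mod_right] at hd
      have hdvd : M ∣ p - 1 := Nat.dvd_of_mod_eq_zero hd
      obtain ⟨t, ht⟩ := hdvd
      have hp1 : p = M * t + 1 ∨ p = 0 := by omega
      rcases hp1 with hp1 | hp1
      · rw [hp1, Nat.mul_add_mod]
      · exfalso
        rw [hp1] at h5; omega
    · exfalso
      rw [h5] at hd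
      rw [Nat.zero_mul, Nat.zero_add, Nat.mod_eq_of_lt (by omega)] at hd
      omega
  · intro h; exact pvL_congr M p 1 h

lemma pow_inv_iff (M c k : Nat) (h2c : (2 * c) % M = 1 % M) :
    (c ^ k % M = 1 % M) ↔ (2 ^ k % M = 1 % M) := by
  have hmain : (2 ^ k * c ^ k) % M = 1 % M := by
    have := Nat.ModEq.pow k (show Nat.ModEq M (2 * c) 1 from h2c)
    rwa [mul_pow, one_pow] at this
  constructor
  · intro hc
    calc 2 ^ k % M = (2 ^ k * 1) % M := by rw [Nat.mul_one]
      _ = (2 ^ k * c ^ k) % M := (Nat.ModEq.mul_left (2 ^ k) (show Nat.ModEq M 1 (c ^ k) from hc.symm))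
      _ = 1 % M := hmain
  · intro h2
    calc c ^ k % M = (c ^ k * 1) % M := by rw [Nat.mul_one]
      _ = (c ^ k * 2 ^ k) % M := (Nat.ModEq.mul_left (c ^ k) (show Nat.ModEq M 1 (2 ^ k) from h2.symm))
      _ = (2 ^ k * c ^ k) % M := by rw [Nat.mul_comm]
      _ = 1 % M := hmain

-- A's recursion, on the k-times-shuffled even deck, returns the remaining step count
lemma goA_count (mid : Nat) (hm : 1 ≤ mid) (num : Int) (ordn : Nat)
    (hord2 : 2 ^ ordn % (2 * mid + 1) = 1 % (2 * mid + 1))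
    (hmin : ∀ j, 0 < j → j < ordn → 2 ^ j % (2 * mid + 1) ≠ 1 % (2 * mid + 1)) :
    ∀ (fuel k : Nat), k < ordn → ordn - k ≤ fuel →
      pvGoA fuel num (pvL (2 * mid + 1) ((mid + 1) ^ k % (2 * mid + 1))) = ((ordn - k : Nat) : Int) := by
  intro fuel
  induction fuel with
  | zero => intro k hk hf; omega
  | succ fuel ih =>
    intro k hk hf
    set M := 2 * mid + 1 with hMdef
    have hM3 : 3 ≤ M := by omega
    have h2c : (2 * (mid + 1)) % M = 1 % M := by
      have : 2 * (mid + 1) = M + 1 := by omega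
      rw [this, Nat.add_mod_left]
    have hc2 : ((mid + 1) * 2) % M = 1 % M := by rwa [Nat.mul_comm] at h2c
    have hpowinv : ∀ j : Nat, ((mid + 1) ^ j % M) * (2 ^ j % M) % M = 1 % M := by
      intro j
      have hme : Nat.ModEq M (((mid + 1) ^ j % M) * (2 ^ j % M)) ((2 * (mid + 1)) ^ j) := by
        calc ((mid + 1) ^ j % M) * (2 ^ j % M)
            ≡ (mid + 1) ^ j * 2 ^ j [MOD M] := Nat.ModEq.mul (Nat.mod_modEq _ M) (Nat.mod_modEq _ M)
          _ = (2 * (mid + 1)) ^ j := by rw [mul_pow]; ring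
      have h1j : Nat.ModEq M ((2 * (mid + 1)) ^ j) 1 := by
        have := Nat.ModEq.pow j (show Nat.ModEq M (2 * (mid + 1)) 1 from h2c)
        simpa using this
      exact (hme.trans h1j)
    -- the shuffled deck
    have hstep : pvStepA (pvL M ((mid + 1) ^ k % M)) = pvL M ((mid + 1) ^ (k + 1) % M) := by
      rw [step_pvL mid ((mid + 1) ^ k % M) (2 ^ k % M) hm (hpowinv k)]
      apply pvL_congr
      have : Nat.ModEq M ((mid + 1) * ((mid + 1) ^ k % M)) ((mid + 1) ^ (k + 1)) := by
        calc (mid + 1) * ((mid + 1) ^ k % M)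
            ≡ (mid + 1) * (mid + 1) ^ k [MOD M] := Nat.ModEq.mul_left _ (Nat.mod_modEq _ M)
          _ = (mid + 1) ^ (k + 1) := by rw [pow_succ]; ring
      calc ((mid + 1) * ((mid + 1) ^ k % M)) % M % M
          = ((mid + 1) * ((mid + 1) ^ k % M)) % M := Nat.mod_mod_of_dvd _ dvd_rfl
        _ = (mid + 1) ^ (k + 1) % M := this
        _ = (mid + 1) ^ (k + 1) % M % M := (Nat.mod_mod_of_dvd _ dvd_rfl).symm
    have hsorted : PySem.List.sorted (pvL M ((mid + 1) ^ (k + 1) % M)) (fun x => x) false = pvL M 1 :=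
      sorted_pvL M _ (2 ^ (k + 1) % M) hM3 (hpowinv (k + 1))
    have hcond : (pvL M ((mid + 1) ^ (k + 1) % M) = pvL M 1) ↔ (2 ^ (k + 1) % M = 1 % M) := by
      rw [pvL_eq_one_iff M _ hM3, Nat.mod_mod_of_dvd _ dvd_rfl]
      exact pow_inv_iff M (mid + 1) (k + 1) h2c
    simp only [pvGoA, hstep, hsorted]
    by_cases hend : k + 1 = ordn
    · rw [if_pos (hcond.2 (hend ▸ hord2))]
      omega
    · have hk1 : k + 1 < ordn := by omega
      rw [if_neg (fun h => hmin (k + 1) (by omega) hk1 (hcond.1 h))]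
      rw [ih (k + 1) hk1 (by omega)]
      omega

-- B's doubling loop computes the multiplicative order of 2 mod M
lemma loopB_count (M : Nat) (hM : 3 ≤ M) (ordn : Nat)
    (hord2 : 2 ^ ordn % M = 1 % M)
    (hmin : ∀ j, 0 < j → j < ordn → 2 ^ j % M ≠ 1 % M) :
    ∀ (fuel k : Nat), 0 < k → k ≤ ordn → ordn - k ≤ fuel →
      pvOrdLoopB fuel (M : Int) (((2 ^ k % M : Nat) : Int)) (k : Int) = ((ordn : Nat) : Int) := by
  intro fuel
  induction fuel with
  | zero =>
    intro k hk0 hkord hf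
    have : k = ordn := by omega
    simp [pvOrdLoopB, this]
  | succ fuel ih =>
    intro k hk0 hkord hf
    have h1M : 1 % M = 1 := Nat.mod_eq_of_lt (by omega)
    by_cases h1 : 2 ^ k % M = 1
    · have hkeq : k = ordn := by
        by_contra hne
        exact hmin k hk0 (by omega) (by rw [h1, h1M])
      subst hkeq
      have hp : ((2 ^ k % M : Nat) : Int) = 1 := by exact_mod_cast h1
      simp [pvOrdLoopB, hp]
    · have hklt : k < ordn := by
        rcases Nat.lt_or_ge k ordn with h | h
        · exact h
        · exfalso; have : k = ordn := by omega
          rw [this, hord2, h1M] at h1; exact h1 rfl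
      have hpne : ((2 ^ k % M : Nat) : Int) ≠ 1 := by
        intro h; exact h1 (by exact_mod_cast h)
      simp only [pvOrdLoopB, if_neg hpne]
      have hmod : PySem.Int.mod (2 * ((2 ^ k % M : Nat) : Int)) (M : Int)
          = ((2 ^ (k + 1) % M : Nat) : Int) := by
        have hcast : 2 * ((2 ^ k % M : Nat) : Int) = ((2 * (2 ^ k % M) : Nat) : Int) := by push_cast; ring
        rw [hcast, PySem.Int.mod_natCast]
        congr 1
        calc 2 * (2 ^ k % M) % M = 2 * 2 ^ k % M :=
              Nat.ModEq.mul_left 2 (Nat.mod_modEq _ M)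
          _ = 2 ^ (k + 1) % M := by rw [pow_succ]; ring_nf
      have hcast2 : (k : Int) + 1 = ((k + 1 : Nat) : Int) := by push_cast; ring
      rw [hmod, hcast2]
      exact ih (k + 1) (by omega) (by omega) (by omega)

-- degenerate decks (length ≤ 1) shuffle to [] which is sorted: A returns 1 immediately
lemma small_step (t : List Int) (h : t.length ≤ 1) : pvStepA t = [] := by
  rw [pvStepA_eq]
  have : t.length / 2 = 0 := by omega
  rw [this]
  simp [pvInter_nil]

lemma sorted_nil_pv : PySem.List.sorted ([] : List Int) (fun x => x) false = [] := by
  apply PySem.List.sorted_eq_self_of_pairwise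
  simp

-- the odd first step: zip truncation drops the last card, acting as the even shuffle of t.take (2*mid)
lemma pvInter_take : ∀ (xs ys : List Int), pvInter xs (ys.take xs.length) = pvInter xs ys := by
  intro xs
  induction xs with
  | nil => intro ys; simp [pvInter_nil]
  | cons x xs ih =>
    intro ys
    cases ys with
    | nil => simp
    | cons y ys => simp [pvInter, ih ys]

lemma step_odd (mid : Nat) (t : List Int) (ht : t.length = 2 * mid + 1) :
    pvStepA t = pvStepA (t.take (2 * mid)) := by
  rw [pvStepA_eq, pvStepA_eq]
  have h1 : t.length / 2 = mid := by omega
  have h2 : (t.take (2 * mid)).length = 2 * mid := by simp [ht]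
  have h3 : 2 * mid / 2 = mid := by omega
  rw [h1, h2, h3, List.take_take, List.drop_take]
  have h4 : min mid (2 * mid) = mid := by omega
  have h5 : 2 * mid - mid = mid := by omega
  rw [h4, h5]
  have h6 : (t.take mid).length = mid := by simp [ht]; omega
  calc pvInter (t.take mid) (t.drop mid)
      = pvInter (t.take mid) ((t.drop mid).take (t.take mid).length) := (pvInter_take _ _).symm
    _ = pvInter (t.take mid) ((t.drop mid).take mid) := by rw [h6]

-- the sorted starting deck list(range(2, num)) is pvL M 1 truncated appropriately
lemma pyRange_start (num : Int) (n : Nat) (hn : ((n : Nat) : Int) = num - 2) :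
    PySem.List.pyRange 2 num 1 = (List.range n).map (fun i => ((i : Nat) : Int) + 2) := by
  rw [PySem.List.pyRange_one]
  have h1 : (num - 2).toNat = n := by omega
  rw [h1]
  exact List.map_congr_left (fun i _ => by ring)

lemma start_eq_pvL (num : Int) (M : Nat) (hM : ((M : Nat) : Int) = num - 1) (h3 : 3 ≤ M) :
    PySem.List.pyRange 2 num 1 = pvL M 1 := by
  rw [pvL_one, pyRange_start num (M - 1) (by omega)]

-- ===== general explicit decks =====

-- Python's 'shuffled == sorted(shuffled)' says exactly: shuffled is non-decreasing
lemma eq_sorted_iff (l : List Int) :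
    (l = PySem.List.sorted l (fun x => x) false) ↔ l.Pairwise (· ≤ ·) := by
  constructor
  · intro h
    have hp := PySem.List.sorted_pairwise (xs := l) (key := fun x => x)
    rw [← h] at hp
    exact hp
  · intro h
    exact (PySem.List.sorted_eq_self_of_pairwise l (fun x => x) h).symm

lemma mulmod_pow (M c j : Nat) : (c * (c ^ j % M)) % M = c ^ (j + 1) % M := by
  calc (c * (c ^ j % M)) % M = (c * c ^ j) % M := Nat.ModEq.mul_left c (Nat.mod_modEq _ M)
    _ = c ^ (j + 1) % M := by rw [pow_succ, Nat.mul_comm]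

lemma pvArrN_length (u : List Int) (mid j : Nat) : (pvArrN u mid j).length = 2 * mid := by
  simp [pvArrN]

lemma pvArrN_zero (mid : Nat) (hmid : 1 ≤ mid) (v : List Int) (hv : v.length = 2 * mid) :
    v = pvArrN v mid 0 := by
  unfold pvArrN
  apply eq_map_range_of_getD v (2 * mid) _ hv
  intro i hi
  have h1M : 1 % (2 * mid + 1) = 1 := Nat.mod_eq_of_lt (by omega)
  rw [pow_zero, h1M, pidx_one (2 * mid + 1) i (by omega)]

-- one shuffle advances the shuffled even deck by one power of the permutation
lemma step_arr (mid j : Nat) (u : List Int) (hu : u.length = 2 * mid) :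
    pvStepA (pvArrN u mid j) = pvArrN u mid (j + 1) := by
  rw [step_even mid _ (pvArrN_length u mid j)]
  unfold pvArrN
  apply List.map_congr_left
  intro i hi
  have hi' : i < 2 * mid := List.mem_range.1 hi
  have hmid1 : 1 ≤ mid := by omega
  have hb : pidx (2 * mid + 1) (mid + 1) i < 2 * mid := by
    have := pidx_lt (2 * mid + 1) (mid + 1) 2 i (by omega)
      (by rw [show (mid + 1) * 2 = (2 * mid + 1) + 1 from by omega, Nat.add_mod_left]) (by omega)
    omega
  rw [getD_map_range_pv _ _ _ hb, pidx_comp (2 * mid + 1) (mid + 1) _ i (by omega)]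
  congr 2
  exact mulmod_pow _ _ _

-- the first shuffle of ANY deck t is the first power applied to its even part
lemma stepA_first (t : List Int) :
    pvStepA t = pvArrN (t.take (2 * (t.length / 2))) (t.length / 2) 1 := by
  by_cases h0 : t.length / 2 = 0
  · rw [small_step t (by omega), h0]
    unfold pvArrN
    simp
  · have hmid1 : 1 ≤ t.length / 2 := by omega
    set mid := t.length / 2 with hmid
    have hcase : t.length = 2 * mid ∨ t.length = 2 * mid + 1 := by omega
    have hlen : (t.take (2 * mid)).length = 2 * mid := by
      rw [List.length_take]; omega
    rcases hcase with hc | hc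
    · have ht : t.take (2 * mid) = t := by rw [← hc, List.take_length]
      rw [ht]
      conv_lhs => rw [pvArrN_zero mid hmid1 t hc]
      exact step_arr mid 0 t hc
    · rw [step_odd mid t hc]
      conv_lhs => rw [pvArrN_zero mid hmid1 _ hlen]
      exact step_arr mid 0 _ hlen

-- A's recursion on the j-times-shuffled even part returns the remaining step count
lemma goA_general (mid : Nat) (u : List Int) (num : Int) (kmin : Nat)
    (hu : u.length = 2 * mid)
    (hks : (pvArrN u mid kmin).Pairwise (· ≤ ·))
    (hmin : ∀ j, 0 < j → j < kmin → ¬ (pvArrN u mid j).Pairwise (· ≤ ·)) :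
    ∀ (fuel j : Nat), j < kmin → kmin - j ≤ fuel →
      pvGoA fuel num (pvArrN u mid j) = ((kmin - j : Nat) : Int) := by
  intro fuel
  induction fuel with
  | zero => intro j hj hf; omega
  | succ fuel ih =>
    intro j hj hf
    simp only [pvGoA, step_arr mid j u hu]
    by_cases hend : j + 1 = kmin
    · rw [if_pos ((eq_sorted_iff _).2 (hend ▸ hks))]
      omega
    · rw [if_neg (fun hcc => hmin (j + 1) (by omega) (by omega) ((eq_sorted_iff _).1 hcc))]
      rw [ih (j + 1) (by omega) (by omega)]
      omega

lemma pow_mod_pos (mid k : Nat) (hmid : 1 ≤ mid) : 1 ≤ (mid + 1) ^ k % (2 * mid + 1) := by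
  by_contra h0
  have hz : (mid + 1) ^ k % (2 * mid + 1) = 0 := by omega
  have h2c : (2 * (mid + 1)) % (2 * mid + 1) = 1 % (2 * mid + 1) := by
    rw [show 2 * (mid + 1) = (2 * mid + 1) + 1 from by omega, Nat.add_mod_left]
  have hmain : (2 ^ k * (mid + 1) ^ k) % (2 * mid + 1) = 1 % (2 * mid + 1) := by
    have := Nat.ModEq.pow k (show Nat.ModEq (2 * mid + 1) (2 * (mid + 1)) 1 from h2c)
    rwa [mul_pow, one_pow] at this
  obtain ⟨t, ht⟩ := Nat.dvd_of_mod_eq_zero hz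
  rw [ht, show 2 ^ k * ((2 * mid + 1) * t) = (2 * mid + 1) * (2 ^ k * t) from by ring,
    Nat.mul_mod_right, Nat.mod_eq_of_lt (by omega)] at hmain
  omega

-- B's comprehension over the permutation power equals the shuffled deck
lemma arrB_eq_arrN (mid k : Nat) (hmid : 1 ≤ mid) (u : List Int) (hu : u.length = 2 * mid) :
    pvArrB u (((mid + 1) ^ k % (2 * mid + 1) : Nat) : Int) ((2 * mid + 1 : Nat) : Int) (2 * mid)
      = pvArrN u mid k := by
  unfold pvArrB pvArrN
  apply List.map_congr_left
  intro i hi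
  set p := (mid + 1) ^ k % (2 * mid + 1) with hp
  have hp1 : 1 ≤ p := pow_mod_pos mid k hmid
  have hcast : ((p : Nat) : Int) * ((i : Nat) + 1) - 1 = ((p * (i + 1) - 1 : Nat) : Int) := by
    have : 1 ≤ p * (i + 1) := Nat.le_mul_of_pos_right _ (by omega) |>.trans'
      (by omega)
    push_cast [Nat.cast_sub this]
    ring
  rw [hcast, PySem.Int.mod_natCast, PySem.List.pyGetD_natCast]
  congr 1
  unfold pidx
  rw [show p * (i + 1) + (2 * mid + 1 - 1) = (p * (i + 1) - 1) + (2 * mid + 1) from by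
    have h1 : 1 ≤ p * (i + 1) := by
      have := Nat.mul_le_mul hp1 (show 1 ≤ i + 1 from by omega); omega
    omega, Nat.add_mod_right]

-- B's bounded search returns the first power that sorts the deck
lemma searchB_count (mid : Nat) (hmid : 1 ≤ mid) (u : List Int) (hu : u.length = 2 * mid)
    (kmin : Nat)
    (hks : (pvArrN u mid kmin).Pairwise (· ≤ ·))
    (hmin : ∀ j, 0 < j → j < kmin → ¬ (pvArrN u mid j).Pairwise (· ≤ ·)) :
    ∀ (fuel k : Nat), 1 ≤ k → k ≤ kmin → kmin - k < fuel →
      pvSearchB u ((2 * mid + 1 : Nat) : Int) ((mid + 1 : Nat) : Int) (2 * mid)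
        fuel (((mid + 1) ^ (k - 1) % (2 * mid + 1) : Nat) : Int) ((k : Nat) : Int)
        = ((kmin : Nat) : Int) := by
  intro fuel
  induction fuel with
  | zero => intro k hk1 hkm hf; omega
  | succ fuel ih =>
    intro k hk1 hkm hf
    have hq2 : PySem.Int.mod ((((mid + 1) ^ (k - 1) % (2 * mid + 1) : Nat) : Int) * ((mid + 1 : Nat) : Int))
        ((2 * mid + 1 : Nat) : Int) = (((mid + 1) ^ k % (2 * mid + 1) : Nat) : Int) := by
      rw [show (((mid + 1) ^ (k - 1) % (2 * mid + 1) : Nat) : Int) * ((mid + 1 : Nat) : Int)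
          = ((((mid + 1) ^ (k - 1) % (2 * mid + 1)) * (mid + 1) : Nat) : Int) from by push_cast; ring,
        PySem.Int.mod_natCast]
      congr 1
      calc ((mid + 1) ^ (k - 1) % (2 * mid + 1)) * (mid + 1) % (2 * mid + 1)
          = ((mid + 1) * ((mid + 1) ^ (k - 1) % (2 * mid + 1))) % (2 * mid + 1) := by
            rw [Nat.mul_comm]
        _ = (mid + 1) ^ (k - 1 + 1) % (2 * mid + 1) := mulmod_pow _ _ _
        _ = (mid + 1) ^ k % (2 * mid + 1) := by rw [show k - 1 + 1 = k from by omega]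
    simp only [pvSearchB, hq2, arrB_eq_arrN mid k hmid u hu]
    by_cases hend : k = kmin
    · rw [if_pos (hend ▸ hks), hend]
    · rw [if_neg (hmin k (by omega) (by omega))]
      have hrec := ih (k + 1) (by omega) (by omega) (by omega)
      rw [show (k + 1) - 1 = k from by omega] at hrec
      rw [show ((k : Nat) : Int) + 1 = ((k + 1 : Nat) : Int) from by push_cast; ring]
      exact hrec

-- the main equality on the intended inputs
lemma main_eq (num : Int) : shuffle_count num [] = shuffle_count_alt num [] := by
  by_cases h1 : num - 2 ≤ 1
  · -- tiny decks: both sides are 1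
    have hlen : (PySem.List.pyRange 2 num 1).length ≤ 1 := by
      rw [PySem.List.length_pyRange_one]; omega
    unfold shuffle_count shuffle_count_alt
    simp only [List.length_nil, reduceIte, if_pos h1]
    rw [show num.toNat + 0 + 2 = (num.toNat + 1) + 1 from by omega, pvGoA_succ,
      small_step _ hlen, sorted_nil_pv, if_pos rfl]
  · -- real decks: both sides are the multiplicative order of 2 mod M
    push_neg at h1
    set n : Nat := (num - 2).toNat with hn
    have hn2 : 2 ≤ n := by omega
    have hnum : ((n : Nat) : Int) = num - 2 := by omega
    have hnumtoNat : num.toNat = n + 2 := by omega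
    -- mid: the modulus is M = 2*mid+1 (odd in both parity cases)
    obtain ⟨mid, hmid, hmcase⟩ :
        ∃ (mid : Nat), 1 ≤ mid ∧
          ((n % 2 = 0 ∧ 2 * mid + 1 = n + 1) ∨ (n % 2 = 1 ∧ 2 * mid + 1 = n)) := by
      by_cases he : n % 2 = 0
      · exact ⟨n / 2, by omega, Or.inl ⟨he, by omega⟩⟩
      · exact ⟨n / 2, by omega, Or.inr ⟨by omega, by omega⟩⟩
    set M : Nat := 2 * mid + 1 with hModd
    have hM3 : 3 ≤ M := by omega
    have hMn : M ≤ n + 1 := by omega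
    -- order of 2 mod M
    have hcop : Nat.Coprime 2 M := by
      have hModdM : M % 2 = 1 := by omega
      exact Nat.coprime_two_left.2 (Nat.odd_iff.2 hModdM)
    have hex : ∃ e, 0 < e ∧ 2 ^ e % M = 1 % M :=
      ⟨Nat.totient M, Nat.totient_pos.2 (by omega), Nat.ModEq.pow_totient hcop⟩
    obtain ⟨ordn, hfind, hord1, hord2, hmin, hordle⟩ :
        ∃ ordn : Nat, ordn = Nat.find hex ∧ 0 < ordn ∧ 2 ^ ordn % M = 1 % M ∧
          (∀ j, 0 < j → j < ordn → 2 ^ j % M ≠ 1 % M) ∧ ordn ≤ Nat.totient M := by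
      refine ⟨Nat.find hex, rfl, (Nat.find_spec hex).1, (Nat.find_spec hex).2, ?_, ?_⟩
      · intro j hj0 hjlt hj
        exact (Nat.find_min hex hjlt) ⟨hj0, hj⟩
      · exact Nat.find_min' hex ⟨Nat.totient_pos.2 (by omega), Nat.ModEq.pow_totient hcop⟩
    have hordlt : ordn < M := by
      have h7 : Nat.totient M < M := Nat.totient_lt M (by omega)
      omega
    have h1M : 1 % M = 1 := Nat.mod_eq_of_lt (by omega)
    have h2M : 2 % M = 2 := Nat.mod_eq_of_lt (by omega)
    -- B side
    have hBside : shuffle_count_alt num [] = ((ordn : Nat) : Int) := by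
      unfold shuffle_count_alt
      simp only [List.length_nil, reduceIte]
      rw [if_neg (by omega)]
      have hmodn : PySem.Int.mod (num - 2) 2 = ((n % 2 : Nat) : Int) := by
        rw [← hnum]
        exact_mod_cast PySem.Int.mod_natCast n 2
      have hmval : (if PySem.Int.mod (num - 2) 2 = 0 then num - 2 + 1 else num - 2)
          = ((M : Nat) : Int) := by
        rcases hmcase with ⟨he, hMe⟩ | ⟨he, hMe⟩
        · rw [hmodn, he]; norm_num <;> omega
        · rw [hmodn, he]; norm_num <;> omega
      simp only [hmval]
      have htn : (((M : Nat) : Int)).toNat = M := by simp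
      rw [htn]
      have hstart : PySem.Int.mod 2 ((M : Nat) : Int) = ((2 ^ 1 % M : Nat) : Int) := by
        rw [show (2 : Int) = ((2 : Nat) : Int) from by norm_num, PySem.Int.mod_natCast]
        congr 1
      rw [hstart, show (1 : Int) = ((1 : Nat) : Int) from by norm_num]
      exact loopB_count M hM3 ordn hord2 hmin (M + 1) 1 (by omega) (by omega) (by omega)
    -- A side
    have hAside : shuffle_count num [] = ((ordn : Nat) : Int) := by
      unfold shuffle_count
      simp only [List.length_nil, reduceIte]
      rcases hmcase with ⟨he, hMe⟩ | ⟨he, hMe⟩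
      · -- even deck: start = pvL M 1 = pvL M ((mid+1)^0 % M)
        have hstart : PySem.List.pyRange 2 num 1 = pvL M ((mid + 1) ^ 0 % M) := by
          rw [start_eq_pvL num M (by omega) hM3]
          exact (pvL_congr M _ 1 (by simp [pow_zero, h1M, Nat.mod_mod_of_dvd _ dvd_rfl])).symm
        rw [hstart,
          goA_count mid hmid num ordn hord2 hmin (num.toNat + 0 + 2) 0 hord1 (by omega)]
        simp
      · -- odd deck: the first shuffle drops the last card and acts as the even shuffle
        have hstart : PySem.List.pyRange 2 num 1 = (List.range n).map (fun i => ((i : Nat) : Int) + 2) :=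
          pyRange_start num n hnum
        have hlenstart : (PySem.List.pyRange 2 num 1).length = 2 * mid + 1 := by
          rw [hstart]; simp; omega
        rw [show num.toNat + 0 + 2 = (num.toNat + 1) + 1 from by omega, pvGoA_succ]
        have htake : (PySem.List.pyRange 2 num 1).take (2 * mid) = pvL M 1 := by
          rw [hstart, pvL_one, ← List.map_take, List.take_range]
          congr 2
          omega
        have hstep1 : pvStepA (PySem.List.pyRange 2 num 1) = pvL M ((mid + 1) ^ 1 % M) := by
          rw [step_odd mid _ hlenstart, htake,
            step_pvL mid 1 1 hmid (by rw [Nat.mul_one, h1M])]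
          exact pvL_congr M _ _ (by
            rw [Nat.mod_mod_of_dvd _ dvd_rfl, Nat.mod_mod_of_dvd _ dvd_rfl,
              Nat.mul_one, pow_one])
        have h2c : (2 * (mid + 1)) % M = 1 % M := by
          rw [show 2 * (mid + 1) = M + 1 from by omega, Nat.add_mod_left]
        have hpowinv1 : ((mid + 1) ^ 1 % M) * (2 ^ 1 % M) % M = 1 % M := by
          rw [pow_one, pow_one, h2M]
          calc (mid + 1) % M * 2 % M = (mid + 1) * 2 % M :=
                Nat.ModEq.mul_right 2 (Nat.mod_modEq _ M)
            _ = 1 % M := by rw [Nat.mul_comm]; exact h2c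
        have hsorted : PySem.List.sorted (pvL M ((mid + 1) ^ 1 % M)) (fun x => x) false = pvL M 1 :=
          sorted_pvL M _ (2 ^ 1 % M) hM3 hpowinv1
        have hcond : ¬ (pvL M ((mid + 1) ^ 1 % M) = pvL M 1) := by
          intro hcc
          have hmod1 := (pvL_eq_one_iff M _ hM3).1 hcc
          rw [Nat.mod_mod_of_dvd _ dvd_rfl] at hmod1
          have h21 := (pow_inv_iff M (mid + 1) 1 h2c).1 hmod1
          rw [pow_one, h2M, h1M] at h21
          omega
        rw [hstep1]
        simp only [hsorted, if_neg hcond]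
        have hord_ne1 : ordn ≠ 1 := by
          intro hh
          have hbad := hord2
          rw [hh, pow_one, h2M, h1M] at hbad
          omega
        rw [goA_count mid hmid num ordn hord2 hmin (num.toNat + 1) 1 (by omega) (by omega)]
        push_cast [Nat.cast_sub (by omega : 1 ≤ ordn)]
        omega
    rw [hAside, hBside]

-- the main equality on explicit non-empty decks whose shuffle orbit reaches sorted order
lemma main_nonempty (num : Int) (temp : List Int) (hne : temp ≠ [])
    (hex0 : ∃ k ∈ Finset.Icc 1 (2 * (temp.length / 2) + 1),
      (pvArrN (temp.take (2 * (temp.length / 2))) (temp.length / 2) k).Pairwise (· ≤ ·)) :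
    shuffle_count num temp = shuffle_count_alt num temp := by
  have hlen0 : ¬ temp.length = 0 := fun h => hne (List.length_eq_zero_iff.1 h)
  by_cases hmid0 : temp.length / 2 = 0
  · -- temp = [x]: the first shuffle already yields the empty (sorted) deck
    have hlen1 : temp.length = 1 := by omega
    have hA : shuffle_count num temp = 1 := by
      unfold shuffle_count
      rw [if_neg hlen0,
        show num.toNat + temp.length + 2 = (num.toNat + temp.length + 1) + 1 from by omega,
        pvGoA_succ, small_step temp (by omega), sorted_nil_pv, if_pos rfl]
    have hB : shuffle_count_alt num temp = 1 := by
      unfold shuffle_count_alt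
      rw [if_neg hlen0]
      have hslice : PySem.List.slice temp none (some (2 * PySem.Int.floordiv (temp.length : Int) 2))
          = ([] : List Int) := by
        rw [show 2 * PySem.Int.floordiv ((temp.length : Nat) : Int) 2 = ((2 * (temp.length / 2) : Nat) : Int) from by
              rw [show PySem.Int.floordiv ((temp.length : Nat) : Int) 2 = ((temp.length / 2 : Nat) : Int) from by
                    exact_mod_cast PySem.Int.floordiv_natCast temp.length 2]
              push_cast; omega,
          PySem.List.slice_to_natCast, hmid0]
        simp
      rw [hslice]
      show pvSearchB ([] : List Int) 1 1 0 1 1 1 = 1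
      decide
    rw [hA, hB]
  · -- the general even part u of size 2*mid, mid ≥ 1
    have hmid1 : 1 ≤ temp.length / 2 := by omega
    set mid := temp.length / 2 with hmiddef
    set u := temp.take (2 * mid) with hudef
    have hulen : u.length = 2 * mid := by
      rw [hudef, List.length_take]; omega
    have hex : ∃ k, 0 < k ∧ (pvArrN u mid k).Pairwise (· ≤ ·) := by
      obtain ⟨k, hk, hp⟩ := hex0
      rw [Finset.mem_Icc] at hk
      exact ⟨k, by omega, hp⟩
    obtain ⟨kmin, hk1, hks, hmin, hkbound⟩ :
        ∃ kmin, 0 < kmin ∧ (pvArrN u mid kmin).Pairwise (· ≤ ·) ∧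
          (∀ j, 0 < j → j < kmin → ¬ (pvArrN u mid j).Pairwise (· ≤ ·)) ∧ kmin ≤ 2 * mid + 1 := by
      refine ⟨Nat.find hex, (Nat.find_spec hex).1, (Nat.find_spec hex).2, ?_, ?_⟩
      · intro j hj0 hjlt hj; exact Nat.find_min hex hjlt ⟨hj0, hj⟩
      · obtain ⟨k, hk, hp⟩ := hex0
        rw [Finset.mem_Icc] at hk
        have := Nat.find_min' hex ⟨by omega, hp⟩
        omega
    have hAside : shuffle_count num temp = ((kmin : Nat) : Int) := by
      unfold shuffle_count
      rw [if_neg hlen0,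
        show num.toNat + temp.length + 2 = (num.toNat + temp.length + 1) + 1 from by omega,
        pvGoA_succ, stepA_first temp]
      by_cases hone : kmin = 1
      · rw [if_pos ((eq_sorted_iff _).2 (hone ▸ hks))]
        simp [hone]
      · rw [if_neg (fun hcc => hmin 1 (by omega) (by omega) ((eq_sorted_iff _).1 hcc))]
        rw [goA_general mid u num kmin hulen hks hmin (num.toNat + temp.length + 1) 1
          (by omega) (by omega)]
        omega
    have hBside : shuffle_count_alt num temp = ((kmin : Nat) : Int) := by
      unfold shuffle_count_alt
      rw [if_neg hlen0]
      have hslice : PySem.List.slice temp none (some (2 * PySem.Int.floordiv (temp.length : Int) 2))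
          = u := by
        rw [show 2 * PySem.Int.floordiv ((temp.length : Nat) : Int) 2 = ((2 * mid : Nat) : Int) from by
              rw [show PySem.Int.floordiv ((temp.length : Nat) : Int) 2 = ((temp.length / 2 : Nat) : Int) from by
                    exact_mod_cast PySem.Int.floordiv_natCast temp.length 2]
              push_cast; omega,
          PySem.List.slice_to_natCast]
      rw [hslice]
      show pvSearchB u ((u.length : Int) + 1) (PySem.Int.floordiv (u.length : Int) 2 + 1)
        u.length ((u.length : Int) + 1).toNat 1 1 = ((kmin : Nat) : Int)
      rw [hulen]
      rw [show ((2 * mid : Nat) : Int) + 1 = ((2 * mid + 1 : Nat) : Int) from by push_cast; ring,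
        show PySem.Int.floordiv ((2 * mid : Nat) : Int) 2 + 1 = ((mid + 1 : Nat) : Int) from by
          rw [show PySem.Int.floordiv ((2 * mid : Nat) : Int) 2 = ((2 * mid / 2 : Nat) : Int) from by
                exact_mod_cast PySem.Int.floordiv_natCast (2 * mid) 2,
            show 2 * mid / 2 = mid from by omega]
          push_cast; ring,
        show (((2 * mid + 1 : Nat) : Int)).toNat = 2 * mid + 1 from by omega]
      have hs := searchB_count mid hmid1 u hulen kmin hks hmin (2 * mid + 1) 1 (by omega)
        (by omega) (by omega)
      rw [show (((mid + 1) ^ (1 - 1) % (2 * mid + 1) : Nat) : Int) = (1 : Int) from by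
            rw [show (1 : Nat) - 1 = 0 from rfl, pow_zero, Nat.mod_eq_of_lt (by omega)]
            norm_num,
        show ((1 : Nat) : Int) = (1 : Int) from by norm_num] at hs
      exact hs
    rw [hAside, hBside]

-- ===== VERDICT (by name: the statement is the Claim_ definition above) =====
theorem shuffle_count_spec : Claim_equal_shuffle_count := by
  intro num temp _ hpre
  unfold Spec_shuffle_count
  by_cases hne : temp = []
  · rw [hne]
    exact main_eq num
  · rcases hpre with h | h
    · exact absurd h hne
    · exact main_nonempty num temp hne h
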